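-- pv_equiv track=rewrite | github.com/backordinary/QDP-FSL | source/0/main_v2_checkpoint_b96a0b.py | marginal_counts_dictionary
-- ===== SOURCE A (Python) =====
-- def marginal_counts_dictionary( counts , idx ):
--
--     if len(idx) == 0 :
--         marginal_counts = counts
--     else:
--         marginal_counts = {}
--         for key in counts:
--             sub_key = ''
--             for k in idx:
--                 sub_key += key[k]
--             if sub_key in marginal_counts:
--                 marginal_counts[sub_key] += counts[key]
--             else:
--                 marginal_counts[sub_key] = counts[key]
--
--     return marginal_counts
-- ===== SOURCE B (Python) =====
-- def marginal_counts_dictionary(counts, idx):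
--     if len(idx) == 0:
--         return counts
--     pairs = [(''.join(key[k] for k in idx), counts[key]) for key in counts]
--     return {s: sum(v for t, v in pairs if t == s)
--             for s in dict.fromkeys(t for t, _ in pairs)}
-- ===== Notes on version B (the rewrite author's own statement) =====
-- stated objective: alternative
-- what changed: Replaces A's single-pass dict accumulation (check-membership, then += or insert per key) by a grouped formulation: compute all (sub_key, count) pairs once, then emit one entry per distinct sub_key in first-occurrence order whose value is the sum over its group.
import Mathlib
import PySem

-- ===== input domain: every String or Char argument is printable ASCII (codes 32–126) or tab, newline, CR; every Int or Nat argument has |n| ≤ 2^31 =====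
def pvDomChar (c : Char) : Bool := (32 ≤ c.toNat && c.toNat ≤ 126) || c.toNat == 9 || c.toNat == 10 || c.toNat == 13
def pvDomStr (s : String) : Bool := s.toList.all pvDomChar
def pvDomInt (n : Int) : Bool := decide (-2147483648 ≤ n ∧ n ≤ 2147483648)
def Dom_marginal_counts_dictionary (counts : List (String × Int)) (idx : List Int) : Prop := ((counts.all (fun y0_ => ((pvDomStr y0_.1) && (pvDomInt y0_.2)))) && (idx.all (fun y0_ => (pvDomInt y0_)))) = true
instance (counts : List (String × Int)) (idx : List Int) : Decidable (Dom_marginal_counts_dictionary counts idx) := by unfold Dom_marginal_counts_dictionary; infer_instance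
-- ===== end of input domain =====

-- B replaces A's single-pass dict accumulation by a grouped formulation: compute all
-- (sub_key, count) pairs once, then build one entry per distinct sub_key (first-occurrence
-- order) whose value is the sum over its group; objective: alternative (same result, no speed claim).
-- When idx == [] both return the argument `counts` itself (shared reference, a caller could observe aliasing).

-- shared helper: the sub-key ''.join(key[k] for k in idx) / sub_key += key[k] — both Pythons
-- concatenate key[k] left to right over idx; out-of-range k (excluded by Pre_) contributes nothing here.
def pvSubKey (key : String) (idx : List Int) : String :=
  String.ofList (idx.foldl (fun cs k => cs ++ (((PySem.List.pyGet? key.toList k).map (fun c => [c])).getD [])) [])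

-- ===== PORT A =====
-- `for key in counts: … counts[key]`: the input is a Python dict, so the lookup of the
-- iterated key is exactly the paired value p.2 of the association list.
def marginal_counts_dictionary (counts : List (String × Int)) (idx : List Int) : List (String × Int) :=
  if idx.length = 0 then counts
  else
    (counts.foldl
      (fun (d : PySem.Dict String Int) p =>
        let sub := pvSubKey p.1 idx
        if d.contains sub then d.modify sub 0 (· + p.2) else d.insert sub p.2)
      PySem.Dict.empty).items

-- ===== PORT B =====
def marginal_counts_dictionary_alt (counts : List (String × Int)) (idx : List Int) : List (String × Int) :=
  if idx.length = 0 then counts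
  else
    let pairs := counts.map (fun p => (pvSubKey p.1 idx, p.2))
    (PySem.List.dedup (pairs.map Prod.fst)).map
      (fun s => (s, ((pairs.filter (fun q => q.1 == s)).map Prod.snd).sum))

-- ===== PRECONDITION & SPEC =====
-- Pre_ excludes exactly the inputs where Python A raises IndexError: some key too short for some k in idx.
def Pre_marginal_counts_dictionary (counts : List (String × Int)) (idx : List Int) : Prop :=
  ∀ p ∈ counts, ∀ k ∈ idx, PySem.Raise.InRange p.1.toList.length k
instance (counts : List (String × Int)) (idx : List Int) : Decidable (Pre_marginal_counts_dictionary counts idx) := by unfold Pre_marginal_counts_dictionary; infer_instance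

def pvWitness_marginal_counts_dictionary : (List (String × Int)) × List Int :=
  ([("01", 3), ("11", 2), ("10", 1)], [1])

def Spec_marginal_counts_dictionary (counts : List (String × Int)) (idx : List Int) (out : List (String × Int)) : Prop := out = marginal_counts_dictionary_alt counts idx
instance (counts : List (String × Int)) (idx : List Int) (out : List (String × Int)) : Decidable (Spec_marginal_counts_dictionary counts idx out) := by unfold Spec_marginal_counts_dictionary; infer_instance

-- ===== CLAIM (what is proved, stated in full; the proofs are below) =====
def Claim_equal_marginal_counts_dictionary : Prop := ∀ (counts : List (String × Int)) (idx : List Int), Dom_marginal_counts_dictionary counts idx → Pre_marginal_counts_dictionary counts idx → Spec_marginal_counts_dictionary counts idx (marginal_counts_dictionary counts idx)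

-- ===== LEMMAS AND PROOFS =====

-- A's loop body is one overwrite-insert: `+=` on a present key is insert of the bumped value,
-- and on an absent key getD is the default 0.
lemma pv_step_eq (d : PySem.Dict String Int) (s : String) (v : Int) :
    (if d.contains s then d.modify s 0 (· + v) else d.insert s v)
      = d.insert s (d.getD s 0 + v) := by
  by_cases h : d.contains s = true
  · simp [h, PySem.Dict.modify]
  · have h' : d.contains s = false := by simpa using h
    simp [h', PySem.Dict.getD_of_not_contains d 0 h']

-- value invariant of the accumulation loop: each key ends at its start value plus its group sum
lemma pv_getD_foldl_ins (ps : List (String × Int)) (d : PySem.Dict String Int) (s : String) :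
    (ps.foldl (fun d q => d.insert q.1 (d.getD q.1 0 + q.2)) d).getD s 0
      = d.getD s 0 + ((ps.filter (fun q => q.1 == s)).map Prod.snd).sum := by
  induction ps generalizing d with
  | nil => simp
  | cons q tl ih =>
    simp only [List.foldl_cons, ih, List.filter_cons]
    by_cases h : q.1 = s
    · subst h
      simp
      ring
    · have h' : ¬ s = q.1 := fun e => h e.symm
      simp [h, h', PySem.Dict.getD_insert]

-- ===== VERDICT (by name: the statement is the Claim_ definition above) =====
theorem marginal_counts_dictionary_spec : Claim_equal_marginal_counts_dictionary := by
  intro counts idx _dom _pre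
  unfold Spec_marginal_counts_dictionary marginal_counts_dictionary marginal_counts_dictionary_alt
  by_cases hidx : idx.length = 0
  · simp [hidx]
  · simp only [if_neg hidx]
    -- rewrite A's loop body to the single insert form, over the (sub_key, value) pairs
    have hbody :
        (fun (d : PySem.Dict String Int) (p : String × Int) =>
            let sub := pvSubKey p.1 idx
            if d.contains sub then d.modify sub 0 (· + p.2) else d.insert sub p.2)
          = (fun d p => d.insert (pvSubKey p.1 idx) (d.getD (pvSubKey p.1 idx) 0 + p.2)) := by
      funext d p
      exact pv_step_eq d (pvSubKey p.1 idx) p.2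
    rw [hbody]
    have hfold :
        counts.foldl (fun (d : PySem.Dict String Int) p =>
            d.insert (pvSubKey p.1 idx) (d.getD (pvSubKey p.1 idx) 0 + p.2)) PySem.Dict.empty
          = (counts.map (fun p => (pvSubKey p.1 idx, p.2))).foldl
              (fun d q => d.insert q.1 (d.getD q.1 0 + q.2)) PySem.Dict.empty := by
      rw [List.foldl_map]
    rw [hfold]
    set ps := counts.map (fun p => (pvSubKey p.1 idx, p.2)) with hps
    set D := ps.foldl (fun (d : PySem.Dict String Int) q => d.insert q.1 (d.getD q.1 0 + q.2))
        PySem.Dict.empty with hD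
    have hkeys : D.keys = PySem.List.dedup (ps.map Prod.fst) := by
      rw [hD, PySem.Dict.keys_foldl_insert_key ps Prod.fst
            (fun d q => d.getD q.1 0 + q.2) PySem.Dict.empty]
      exact PySem.Set.update_empty (ps.map Prod.fst)
    have hnodup : D.keys.Nodup := by
      rw [hD]
      exact PySem.Dict.nodup_keys_foldl_insert_key ps Prod.fst
        (fun d q => d.getD q.1 0 + q.2) PySem.Dict.empty (by simp)
    rw [PySem.Dict.items_eq_map_keys D hnodup 0, hkeys]
    refine List.map_congr_left (fun s _ => ?_)
    rw [hD, pv_getD_foldl_ins]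
    simp
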